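-- pv_equiv track=rewrite | github.com/bigfrog10/python-tutorial | src/tutorials/chapter_05_functions/hidding.py | hide2
-- ===== SOURCE A (Python) =====
-- from bisect import bisect_left
--
-- def hide2(int_arr):
--     arr = sorted(int_arr)
--     size = len(arr)
--
--     flags = [-1] * size
--     for i in range(size):
--         v = arr[i]*3
--         p = bisect_left(arr, v, lo=i+1)
--         if p < size and arr[p] != v:
--             p += 1
--         if p < size:
--             flags[p] = i
--
--     return list(zip(arr, flags))
-- ===== SOURCE B (Python) =====
-- def hide2(int_arr):
--     arr = sorted(int_arr)
--     size = len(arr)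
--     flags = [-1] * size
--     j = 0
--     for i in range(size):
--         v = 3 * arr[i]
--         if j < i + 1:
--             j = i + 1
--         while j < size and arr[j] < v:
--             j += 1
--         p = j
--         if p < size and arr[p] != v:
--             p += 1
--         if p < size:
--             flags[p] = i
--     return list(zip(arr, flags))
-- ===== Notes on version B (the rewrite author's own statement) =====
-- stated objective: alternative
-- what changed: Replaces the per-element bisect_left binary search (lo=i+1) by a single monotone forward pointer that is clamped to i+1 and swept once across the sorted array, turning the post-sort phase from O(n log n) into amortized O(n).
import Mathlib
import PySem

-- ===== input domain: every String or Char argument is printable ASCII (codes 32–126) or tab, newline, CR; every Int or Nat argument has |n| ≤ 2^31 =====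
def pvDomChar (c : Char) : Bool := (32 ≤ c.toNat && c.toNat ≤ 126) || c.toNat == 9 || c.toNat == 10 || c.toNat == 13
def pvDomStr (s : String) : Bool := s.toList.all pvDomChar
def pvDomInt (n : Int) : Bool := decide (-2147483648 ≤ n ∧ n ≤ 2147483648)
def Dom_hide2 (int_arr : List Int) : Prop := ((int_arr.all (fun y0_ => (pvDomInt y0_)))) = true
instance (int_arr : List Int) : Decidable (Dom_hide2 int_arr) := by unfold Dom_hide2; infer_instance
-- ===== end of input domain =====

-- B replaces A's per-element bisect_left binary search by a single monotone forward
-- pointer swept once over the sorted array (alternative decomposition; same results).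

-- ===== PORT A =====
-- bisect_left(arr, v, lo=i+1) is ported via PySem's own binary-search loop
-- (PySem.List.bisectLeft = bisectLeftLoop with lo = 0), passing the lo bound.
def hide2 (int_arr : List Int) : List (Int × Int) :=
  let arr := PySem.List.sorted int_arr (fun x => x)
  let size := arr.length
  let flags :=
    (List.range size).foldl (fun flags i =>
      let v := arr.getD i 0 * 3
      let p := PySem.List.bisectLeftLoop arr v size (i + 1) size
      let p := if p < size ∧ ¬ (arr.getD p 0 = v) then p + 1 else p
      if p < size then flags.set p (i : Int) else flags)
      (List.replicate size ((-1 : Int)))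
  arr.zip flags

-- ===== PORT B =====
-- the `while j < size and arr[j] < v: j += 1` pointer sweep
-- (fuel `size - j` only totalizes the while loop; the guard is the same)
def advanceAux (arr : List Int) (v : Int) (size : Nat) : Nat → Nat → Nat
  | j, 0 => j
  | j, fuel + 1 =>
    if j < size ∧ arr.getD j 0 < v then advanceAux arr v size (j + 1) fuel else j

def advance (arr : List Int) (v : Int) (size j : Nat) : Nat :=
  advanceAux arr v size j (size - j)

def hide2_alt (int_arr : List Int) : List (Int × Int) :=
  let arr := PySem.List.sorted int_arr (fun x => x)
  let size := arr.length
  let st :=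
    (List.range size).foldl (fun st i =>
      let v := 3 * arr.getD i 0
      let j := if st.2 < i + 1 then i + 1 else st.2
      let j := advance arr v size j
      let p := if j < size ∧ ¬ (arr.getD j 0 = v) then j + 1 else j
      (if p < size then st.1.set p (i : Int) else st.1, j))
      ((List.replicate size (-1) : List Int), (0 : Nat))
  arr.zip st.1

-- ===== PRECONDITION & SPEC =====
def Spec_hide2 (int_arr : List Int) (out : List (Int × Int)) : Prop := out = hide2_alt int_arr
instance (int_arr : List Int) (out : List (Int × Int)) : Decidable (Spec_hide2 int_arr out) := by unfold Spec_hide2; infer_instance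

-- ===== CLAIM (what is proved, stated in full; the proofs are below) =====
def Claim_equal_hide2 : Prop := ∀ (int_arr : List Int), Dom_hide2 int_arr → Spec_hide2 int_arr (hide2 int_arr)

-- ===== LEMMAS AND PROOFS =====

-- "r is the left insertion point for v in arr at or after lo" (with hi = arr.length)
def Ins (arr : List Int) (v : Int) (lo r : Nat) : Prop :=
  lo ≤ r ∧ r ≤ arr.length ∧ (∀ k, lo ≤ k → k < r → arr.getD k 0 < v) ∧
    (r < arr.length → ¬ arr.getD r 0 < v)

theorem Ins_unique {arr : List Int} {v : Int} {lo r1 r2 : Nat}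
    (h1 : Ins arr v lo r1) (h2 : Ins arr v lo r2) : r1 = r2 := by
  obtain ⟨a1, b1, c1, d1⟩ := h1
  obtain ⟨a2, b2, c2, d2⟩ := h2
  rcases Nat.lt_trichotomy r1 r2 with h | h | h
  · exact absurd (c2 r1 a1 h) (d1 (lt_of_lt_of_le h b2))
  · exact h
  · exact absurd (c1 r2 a2 h) (d2 (lt_of_lt_of_le h b1))

-- monotone access on a Pairwise-(≤) list
theorem getD_mono {arr : List Int} (hs : List.Pairwise (· ≤ ·) arr)
    {a b : Nat} (hab : a ≤ b) (hb : b < arr.length) : arr.getD a 0 ≤ arr.getD b 0 := by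
  rcases Nat.lt_or_ge a b with h | h
  · rw [List.getD_eq_getElem _ _ (lt_trans h hb), List.getD_eq_getElem _ _ hb]
    exact (List.pairwise_iff_getElem.mp hs) a b (lt_trans h hb) hb h
  · have : a = b := le_antisymm hab h
    subst this; rfl

theorem advanceAux_succ (arr : List Int) (v : Int) (size j fuel : Nat) :
    advanceAux arr v size j (fuel + 1) =
      if j < size ∧ arr.getD j 0 < v then advanceAux arr v size (j + 1) fuel else j := rfl

theorem advance_eq (arr : List Int) (v : Int) (size j : Nat) :
    advance arr v size j =
      if j < size ∧ arr.getD j 0 < v then advance arr v size (j + 1) else j := by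
  by_cases h : j < size ∧ arr.getD j 0 < v
  · have hf : size - j = (size - (j + 1)) + 1 := by omega
    simp only [advance, hf, advanceAux_succ]
  · cases hf : size - j with
    | zero => simp only [advance, hf]; rw [if_neg h]; rfl
    | succ n => simp only [advance, hf, advanceAux_succ]; rw [if_neg h, if_neg h]

theorem advance_spec (arr : List Int) (v : Int) (j : Nat) (hj : j ≤ arr.length) :
    j ≤ advance arr v arr.length j ∧ advance arr v arr.length j ≤ arr.length ∧
      (∀ k, j ≤ k → k < advance arr v arr.length j → arr.getD k 0 < v) ∧
      (advance arr v arr.length j < arr.length → ¬ arr.getD (advance arr v arr.length j) 0 < v) := by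
  have main : ∀ m j, j ≤ arr.length → arr.length - j ≤ m →
      j ≤ advance arr v arr.length j ∧ advance arr v arr.length j ≤ arr.length ∧
        (∀ k, j ≤ k → k < advance arr v arr.length j → arr.getD k 0 < v) ∧
        (advance arr v arr.length j < arr.length → ¬ arr.getD (advance arr v arr.length j) 0 < v) := by
    intro m
    induction m with
    | zero =>
      intro j hj hm
      have hje : j = arr.length := by omega
      rw [advance_eq, if_neg (by omega)]
      exact ⟨le_rfl, hj, fun k hk hkr => absurd hkr (by omega), fun h => absurd h (by omega)⟩
    | succ m ih =>
      intro j hj hm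
      rw [advance_eq]
      by_cases h : j < arr.length ∧ arr.getD j 0 < v
      · rw [if_pos h]
        obtain ⟨a, b, c, d⟩ := ih (j + 1) (by omega) (by omega)
        refine ⟨by omega, b, ?_, d⟩
        intro k hk hkr
        rcases eq_or_lt_of_le hk with rfl | h2
        · exact h.2
        · exact c k (by omega) hkr
      · rw [if_neg h]
        exact ⟨le_rfl, hj, fun k hk hkr => absurd hkr (by omega),
          fun hlt hcon => h ⟨hlt, hcon⟩⟩
  exact main (arr.length - j) j hj le_rfl

theorem bll_spec {arr : List Int} (hs : List.Pairwise (· ≤ ·) arr) (v : Int) :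
    ∀ fuel lo hi, lo ≤ hi → hi ≤ arr.length → hi - lo ≤ fuel →
      lo ≤ PySem.List.bisectLeftLoop arr v fuel lo hi ∧
      PySem.List.bisectLeftLoop arr v fuel lo hi ≤ hi ∧
      (∀ k, lo ≤ k → k < PySem.List.bisectLeftLoop arr v fuel lo hi → arr.getD k 0 < v) ∧
      (PySem.List.bisectLeftLoop arr v fuel lo hi < hi →
        ¬ arr.getD (PySem.List.bisectLeftLoop arr v fuel lo hi) 0 < v) := by
  intro fuel
  induction fuel with
  | zero =>
    intro lo hi h1 h2 h3
    have he : PySem.List.bisectLeftLoop arr v 0 lo hi = lo := rfl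
    rw [he]
    exact ⟨le_rfl, h1, fun k hk hkr => absurd hkr (by omega), fun h => absurd h (by omega)⟩
  | succ fuel ih =>
    intro lo hi h1 h2 h3
    by_cases hlh : lo < hi
    · have hmlt : (lo + hi) / 2 < hi := by omega
      have hmge : lo ≤ (lo + hi) / 2 := by omega
      have hmlen : (lo + hi) / 2 < arr.length := by omega
      have hget : arr[(lo + hi) / 2]? = some arr[(lo + hi) / 2] := List.getElem?_eq_getElem hmlen
      have hstep : PySem.List.bisectLeftLoop arr v (fuel + 1) lo hi =
          if arr[(lo + hi) / 2] < v then PySem.List.bisectLeftLoop arr v fuel ((lo + hi) / 2 + 1) hi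
          else PySem.List.bisectLeftLoop arr v fuel lo ((lo + hi) / 2) := by
        simp [PySem.List.bisectLeftLoop, hlh, hget]
      rw [hstep]
      have hmd : arr.getD ((lo + hi) / 2) 0 = arr[(lo + hi) / 2] := List.getD_eq_getElem _ _ hmlen
      by_cases hy : arr[(lo + hi) / 2] < v
      · rw [if_pos hy]
        obtain ⟨a, b, c, d⟩ := ih ((lo + hi) / 2 + 1) hi (by omega) h2 (by omega)
        refine ⟨by omega, b, ?_, d⟩
        intro k hk hkr
        rcases Nat.lt_or_ge k ((lo + hi) / 2 + 1) with h4 | h4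
        · have hle : arr.getD k 0 ≤ arr.getD ((lo + hi) / 2) 0 := getD_mono hs (by omega) hmlen
          exact lt_of_le_of_lt hle (hmd ▸ hy)
        · exact c k h4 hkr
      · rw [if_neg hy]
        obtain ⟨a, b, c, d⟩ := ih lo ((lo + hi) / 2) hmge (by omega) (by omega)
        refine ⟨a, by omega, c, ?_⟩
        intro hrlt
        rcases eq_or_lt_of_le b with he | hl
        · rw [he, hmd]; exact hy
        · exact d hl
    · have he : PySem.List.bisectLeftLoop arr v (fuel + 1) lo hi = lo := by
        simp [PySem.List.bisectLeftLoop, hlh]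
      rw [he]
      exact ⟨le_rfl, h1, fun k hk hkr => absurd hkr (by omega), fun h => absurd h (by omega)⟩

theorem bll_Ins {arr : List Int} (hs : List.Pairwise (· ≤ ·) arr) (v : Int) {lo : Nat}
    (hlo : lo ≤ arr.length) :
    Ins arr v lo (PySem.List.bisectLeftLoop arr v arr.length lo arr.length) := by
  obtain ⟨a, b, c, d⟩ := bll_spec hs v arr.length lo arr.length hlo le_rfl (by omega)
  exact ⟨a, b, c, d⟩

theorem advance_Ins {arr : List Int} (v : Int) {lo m : Nat}
    (hlm : lo ≤ m) (hm : m ≤ arr.length)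
    (hpre : ∀ k, lo ≤ k → k < m → arr.getD k 0 < v) :
    Ins arr v lo (advance arr v arr.length m) := by
  obtain ⟨a, b, c, d⟩ := advance_spec arr v m hm
  refine ⟨le_trans hlm a, b, ?_, d⟩
  intro k hk hkr
  rcases Nat.lt_or_ge k m with h | h
  · exact hpre k hk h
  · exact c k h hkr

-- the two loop bodies, as the ports write them (with size = arr.length)
def stepA (arr : List Int) : List Int → Nat → List Int :=
  fun flags i =>
    let v := arr.getD i 0 * 3
    let p := PySem.List.bisectLeftLoop arr v arr.length (i + 1) arr.length
    let p := if p < arr.length ∧ ¬ (arr.getD p 0 = v) then p + 1 else p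
    if p < arr.length then flags.set p (i : Int) else flags

def stepB (arr : List Int) : List Int × Nat → Nat → List Int × Nat :=
  fun st i =>
    let v := 3 * arr.getD i 0
    let j := if st.2 < i + 1 then i + 1 else st.2
    let j := advance arr v arr.length j
    let p := if j < arr.length ∧ ¬ (arr.getD j 0 = v) then j + 1 else j
    (if p < arr.length then st.1.set p (i : Int) else st.1, j)

-- main fold invariant: flags agree and the carried pointer has skipped only
-- elements strictly below the next threshold 3*arr[n]
theorem fold_inv (arr : List Int) (hs : List.Pairwise (· ≤ ·) arr) :
    ∀ n, n ≤ arr.length →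
      ((List.range n).foldl (stepB arr) ((List.replicate arr.length (-1 : Int)), 0)).1 =
        (List.range n).foldl (stepA arr) (List.replicate arr.length (-1 : Int)) ∧
      ((List.range n).foldl (stepB arr) ((List.replicate arr.length (-1 : Int)), 0)).2 ≤ arr.length ∧
      (∀ k, n ≤ k →
        k < ((List.range n).foldl (stepB arr) ((List.replicate arr.length (-1 : Int)), 0)).2 →
        k < arr.length → arr.getD k 0 < 3 * arr.getD n 0) := by
  intro n
  induction n with
  | zero =>
    intro _
    refine ⟨rfl, Nat.zero_le _, ?_⟩
    intro k hk hkr hkl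
    simp only [List.range_zero, List.foldl_nil] at hkr
    omega
  | succ n ih =>
    intro hn
    obtain ⟨hfl, hjle, hinv⟩ := ih (by omega)
    rw [List.range_succ, List.foldl_append, List.foldl_append, List.foldl_cons, List.foldl_cons,
      List.foldl_nil, List.foldl_nil]
    set st := (List.range n).foldl (stepB arr) ((List.replicate arr.length (-1 : Int)), 0) with hst
    set v := 3 * arr.getD n 0 with hv
    set m := if st.2 < n + 1 then n + 1 else st.2 with hm
    have hm1 : n + 1 ≤ m := by rw [hm]; split <;> omega
    have hm2 : m ≤ arr.length := by rw [hm]; split <;> omega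
    have hmpre : ∀ k, n + 1 ≤ k → k < m → arr.getD k 0 < v := by
      intro k hk hkm
      have hkst : k < st.2 := by rw [hm] at hkm; split at hkm <;> omega
      exact hinv k (by omega) hkst (lt_of_lt_of_le hkst hjle)
    have hInsB : Ins arr v (n + 1) (advance arr v arr.length m) := advance_Ins v hm1 hm2 hmpre
    have hInsA : Ins arr v (n + 1) (PySem.List.bisectLeftLoop arr v arr.length (n + 1) arr.length) :=
      bll_Ins hs v (by omega)
    have hpeq : PySem.List.bisectLeftLoop arr v arr.length (n + 1) arr.length =
        advance arr v arr.length m := Ins_unique hInsA hInsB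
    have hva : arr.getD n 0 * 3 = v := by rw [hv]; ring
    constructor
    · show (stepB arr st n).1 = stepA arr ((List.range n).foldl (stepA arr) _) n
      rw [← hfl]
      simp only [stepA, stepB, ← hm, hva, hpeq, ← hv]
    constructor
    · show (stepB arr st n).2 ≤ arr.length
      simp only [stepB, ← hm, ← hv]
      exact hInsB.2.1
    · intro k hk hkr hkl
      have hkr' : k < advance arr v arr.length m := by
        simpa only [stepB, ← hm, ← hv] using hkr
      have hlt : arr.getD k 0 < v := hInsB.2.2.1 k hk hkr'
      have hmono : arr.getD n 0 ≤ arr.getD (n + 1) 0 := getD_mono hs (by omega) (by omega)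
      calc arr.getD k 0 < v := hlt
        _ ≤ 3 * arr.getD (n + 1) 0 := by rw [hv]; omega

-- ===== VERDICT (by name: the statement is the Claim_ definition above) =====
theorem hide2_spec : Claim_equal_hide2 := by
  intro int_arr _
  show hide2 int_arr = hide2_alt int_arr
  have hs : List.Pairwise (· ≤ ·) (PySem.List.sorted int_arr (fun x => x)) :=
    PySem.List.sorted_pairwise int_arr (fun x => x)
  have h := (fold_inv (PySem.List.sorted int_arr (fun x => x)) hs
    (PySem.List.sorted int_arr (fun x => x)).length le_rfl).1
  exact (congrArg (List.zip (PySem.List.sorted int_arr (fun x => x))) h).symm
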